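-- pv_equiv track=rewrite | github.com/yashasvi-dwivedi/leetcode | robotWithString.py | robotWithString
-- ===== SOURCE A (Python) =====
-- from collections import Counter
--
-- def robotWithString(s):
--     freq = Counter(s)  # Count the frequency of each character in the string
--     st = []  # Stack to simulate the robot's holding area
--     res = []  # Result list to build the output string
--
--     # Helper function to find the smallest character still available in freq
--     def min_char(freq):
--         for i in range(26):  # Loop through 'a' to 'z'
--             ch = chr(ord("a") + i)
--             if freq[ch] > 0:
--                 return ch  # Return the smallest available character
--         return "a"  # Default return (should not be reached)
--
--     # Process each character in the input string
--     for ch in s: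
--         st.append(ch)  # Push the character onto the stack
--         freq[ch] -= 1  # Decrement its frequency
--         # While the top of the stack is <= the smallest remaining character, pop to result
--         while st and st[-1] <= min_char(freq):
--             res.append(st.pop())
--
--     # Pop any remaining characters from the stack to the result
--     while st:
--         res.append(st.pop())
--
--     return "".join(res)  # Join the result list into a string
-- ===== SOURCE B (Python) =====
-- def robotWithString(s):
--     n = len(s)
--     # low[i] = smallest lowercase letter in s[i:], or None if there is none
--     low = [None] * (n + 1)
--     for i in range(n - 1, -1, -1):
--         c = s[i] if 'a' <= s[i] <= 'z' else None
--         nxt = low[i + 1]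
--         if nxt is None or (c is not None and c < nxt):
--             low[i] = c
--         else:
--             low[i] = nxt
--     st = []
--     out = []
--     for i in range(n):
--         st.append(s[i])
--         t = low[i + 1] if low[i + 1] is not None else 'a'
--         while st and st[-1] <= t:
--             out.append(st.pop())
--     while st:
--         out.append(st.pop())
--     return "".join(out)
-- ===== Notes on version B (the rewrite author's own statement) =====
-- stated objective: faster
-- what changed: Replaces A's decremented Counter plus a 26-letter rescan before every pop test by a single backward pass that precomputes, for each position, the smallest lowercase letter remaining in the suffix, so each pop test is an O(1) table lookup.
import Mathlib
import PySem

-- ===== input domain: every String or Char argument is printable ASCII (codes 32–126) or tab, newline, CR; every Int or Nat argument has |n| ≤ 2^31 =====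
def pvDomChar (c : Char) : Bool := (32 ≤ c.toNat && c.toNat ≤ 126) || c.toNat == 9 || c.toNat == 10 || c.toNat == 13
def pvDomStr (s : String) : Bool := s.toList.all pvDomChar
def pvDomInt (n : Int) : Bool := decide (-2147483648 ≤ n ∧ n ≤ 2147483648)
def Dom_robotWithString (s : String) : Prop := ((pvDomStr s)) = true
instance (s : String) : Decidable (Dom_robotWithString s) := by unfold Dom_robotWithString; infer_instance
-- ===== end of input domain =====

-- B replaces A's decremented Counter plus 26-letter rescan before every pop test by one backward
-- pass precomputing the smallest remaining lowercase letter of every suffix; objective: faster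
-- (drops the per-pop-test 26-letter rescan).

-- ===== PORT A =====
-- A's stack `st` appends/pops at the Python list's END: it is stored here top-first (push = cons,
-- pop = head); `res` is kept in Python order (append = ++ [c]).

-- helper min_char: `for i in range(26): ch = chr(ord('a')+i); if freq[ch] > 0: return ch` —
-- a for loop with an early return = find? over the same range; chr(ord('a')+i) = Char.ofNat (97+i)
def minCharA (freq : PySem.Dict Char Int) : Char :=
  match (List.range 26).find? (fun i => decide (0 < freq.getD (Char.ofNat ('a'.toNat + i)) 0)) with
  | some i => Char.ofNat ('a'.toNat + i)
  | none => 'a'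

-- `while st and st[-1] <= min_char(freq): res.append(st.pop())` (the pops do not change freq)
def aPop (freq : PySem.Dict Char Int) : List Char → List Char → List Char × List Char
  | [], res => ([], res)
  | c :: st, res => if c ≤ minCharA freq then aPop freq st (res ++ [c]) else (c :: st, res)

-- final `while st: res.append(st.pop())`
def aDrain : List Char → List Char → List Char
  | [], res => res
  | c :: st, res => aDrain st (res ++ [c])

-- the main `for ch in s` loop
def aGo : List Char → PySem.Dict Char Int → List Char → List Char → List Char
  | [], _, st, res => aDrain st res
  | c :: rest, freq, st, res =>
    let freq' := freq.insert c (freq.getD c 0 - 1)   -- freq[ch] -= 1 (Counter: a missing key reads 0)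
    let p := aPop freq' (c :: st) res
    aGo rest freq' p.1 p.2

def robotWithString (s : String) : String :=
  String.mk (aGo s.toList (PySem.Dict.counter s.toList) [] [])   -- "".join(res)

-- ===== PORT B =====
-- same stack representation as port A (top-first); follows Source B: a backward pass building the
-- suffix table `low` (low[i] = smallest lowercase letter of s[i:], none if there is none),
-- then one forward pass over s zipped with low[1:].

-- body of Source B's backward loop: combine s[i] (if lowercase, else None) with low[i+1]
def combineLow (c? nxt : Option Char) : Option Char :=
  match nxt with
  | none => c?
  | some p => match c? with
    | some cc => if cc < p then some cc else some p
    | none => some p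

-- the list low[i], low[i+1], …, low[n], built back to front (Source B's `for i in range(n-1,-1,-1)`)
def sufLow : List Char → List (Option Char)
  | [] => [none]
  | c :: rest =>
    let t := sufLow rest
    combineLow (if 'a' ≤ c ∧ c ≤ 'z' then some c else none) (t.headD none) :: t

-- `while st and st[-1] <= t: out.append(st.pop())` with the precomputed threshold t
def bPop (t : Char) : List Char → List Char → List Char × List Char
  | [], out => ([], out)
  | c :: st, out => if c ≤ t then bPop t st (out ++ [c]) else (c :: st, out)

def bDrain : List Char → List Char → List Char
  | [], out => out
  | c :: st, out => bDrain st (out ++ [c])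

-- the forward loop, over the (s[i], low[i+1]) pairs
def bGo : List (Char × Option Char) → List Char → List Char → List Char
  | [], st, out => bDrain st out
  | (c, nxt) :: rest, st, out =>
    let t := nxt.getD 'a'
    let p := bPop t (c :: st) out
    bGo rest p.1 p.2

def robotWithString_alt (s : String) : String :=
  String.mk (bGo (s.toList.zip (sufLow s.toList).tail) [] [])

-- ===== PRECONDITION & SPEC =====
def Spec_robotWithString (s : String) (out : String) : Prop := out = robotWithString_alt s
instance (s : String) (out : String) : Decidable (Spec_robotWithString s out) := by unfold Spec_robotWithString; infer_instance

-- ===== CLAIM (what is proved, stated in full; the proofs are below) =====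
def Claim_equal_robotWithString : Prop := ∀ (s : String), Dom_robotWithString s → Spec_robotWithString s (robotWithString s)

-- ===== LEMMAS AND PROOFS =====

-- specification view of B's suffix table: the head of `sufLow l` as a recursive function
def lowMin : List Char → Option Char
  | [] => none
  | c :: r => combineLow (if 'a' ≤ c ∧ c ≤ 'z' then some c else none) (lowMin r)

lemma sufLow_headD : ∀ l : List Char, (sufLow l).headD none = lowMin l := by
  intro l
  induction l with
  | nil => rfl
  | cons c r ih => simp only [sufLow, List.headD_cons, lowMin, ih]

lemma sufLow_eq_cons (l : List Char) : sufLow l = lowMin l :: (sufLow l).tail := by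
  cases l with
  | nil => rfl
  | cons c r =>
    show combineLow _ ((sufLow r).headD none) :: sufLow r = lowMin (c :: r) :: sufLow r
    rw [sufLow_headD r]; rfl

lemma zip_sufLow_cons (c : Char) (r : List Char) :
    (c :: r).zip (sufLow (c :: r)).tail = (c, lowMin r) :: r.zip (sufLow r).tail := by
  have h1 : (sufLow (c :: r)).tail = sufLow r := rfl
  rw [h1]
  conv_lhs => rw [sufLow_eq_cons r]
  rfl

-- the 26 lowercase letters, in order
def lcLetters : List Char :=
  ['a','b','c','d','e','f','g','h','i','j','k','l','m','n','o','p','q','r','s','t','u','v','w','x','y','z']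

set_option maxRecDepth 8192 in
lemma minCharA_eq_find (freq : PySem.Dict Char Int) :
    minCharA freq = (lcLetters.find? (fun c => decide (0 < freq.getD c 0))).getD 'a' := by
  have hmap : lcLetters = (List.range 26).map (fun i => Char.ofNat ('a'.toNat + i)) := rfl
  unfold minCharA
  rw [hmap, List.find?_map]
  simp only [Function.comp_def]
  cases hf : (List.range 26).find? (fun i => decide (0 < freq.getD (Char.ofNat ('a'.toNat + i)) 0)) with
  | none => simp
  | some i => simp

set_option maxRecDepth 100000 in
lemma lcLetters_lower : ∀ c ∈ lcLetters, 'a' ≤ c ∧ c ≤ 'z' := by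
  intro c hc
  fin_cases hc <;> exact ⟨by decide, by decide⟩

lemma lcLetters_sorted : lcLetters.Pairwise (· < ·) := by decide

set_option maxRecDepth 8192 in
lemma mem_lcLetters (c : Char) (h1 : 'a' ≤ c) (h2 : c ≤ 'z') : c ∈ lcLetters := by
  have hmap : lcLetters = (List.range 26).map (fun i => Char.ofNat ('a'.toNat + i)) := rfl
  have h1' : 97 ≤ c.toNat := Char.le_def.mp h1
  have h2' : c.toNat ≤ 122 := Char.le_def.mp h2
  have ha : 'a'.toNat = 97 := rfl
  rw [hmap]
  refine List.mem_map.mpr ⟨c.toNat - 97, List.mem_range.mpr (by omega), ?_⟩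
  have harith : 'a'.toNat + (c.toNat - 97) = c.toNat := by omega
  rw [harith, Char.ofNat_toNat]

lemma find?_sorted_min {l : List Char} (hs : l.Pairwise (· < ·)) {p : Char → Bool} {m m' : Char}
    (hf : l.find? p = some m') (hm : m ∈ l) (hpm : p m = true) : m' ≤ m := by
  induction l with
  | nil => cases hm
  | cons c t ih =>
    rw [List.find?_cons] at hf
    rcases List.pairwise_cons.mp hs with ⟨hc, ht⟩
    by_cases hpc : p c = true
    · simp only [hpc] at hf
      cases hf
      rcases List.mem_cons.mp hm with rfl | hmt
      · exact le_refl _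
      · exact le_of_lt (hc _ hmt)
    · simp only [Bool.not_eq_true] at hpc
      simp only [hpc] at hf
      rcases List.mem_cons.mp hm with rfl | hmt
      · rw [hpm] at hpc; cases hpc
      · exact ih ht hf hmt

lemma find?_congr_mem {α : Type} {l : List α} {p q : α → Bool} (h : ∀ x ∈ l, p x = q x) :
    l.find? p = l.find? q := by
  induction l with
  | nil => rfl
  | cons c t ih =>
    simp only [List.find?_cons]
    rw [h c (List.mem_cons_self ..)]
    cases hq : q c with
    | true => rfl
    | false => exact ih (fun x hx => h x (List.mem_cons_of_mem _ hx))

lemma lowMin_cons_none {r : List Char} {c : Char} (h : lowMin r = none) :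
    lowMin (c :: r) = if 'a' ≤ c ∧ c ≤ 'z' then some c else none := by
  show combineLow _ (lowMin r) = _
  rw [h]
  rfl

lemma lowMin_cons_some {r : List Char} {c p : Char} (h : lowMin r = some p) :
    lowMin (c :: r) = some (if 'a' ≤ c ∧ c ≤ 'z' then (if c < p then c else p) else p) := by
  show combineLow _ (lowMin r) = _
  rw [h]
  by_cases hc : 'a' ≤ c ∧ c ≤ 'z'
  · rw [if_pos hc, if_pos hc]
    show (if c < p then some c else some p) = _
    exact (apply_ite some (c < p) c p).symm
  · rw [if_neg hc, if_neg hc]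
    rfl

lemma lowMin_none : ∀ (l : List Char), lowMin l = none → ∀ c ∈ l, ¬('a' ≤ c ∧ c ≤ 'z') := by
  intro l
  induction l with
  | nil => intro _ c hc; cases hc
  | cons c r ih =>
    intro h d hd
    cases hlm : lowMin r with
    | none =>
      rw [lowMin_cons_none hlm] at h
      split at h
      · cases h
      · rcases List.mem_cons.mp hd with rfl | hdr
        · assumption
        · exact ih hlm d hdr
    | some p => rw [lowMin_cons_some hlm] at h; cases h

lemma lowMin_some : ∀ (l : List Char) (m : Char), lowMin l = some m →
    ('a' ≤ m ∧ m ≤ 'z') ∧ m ∈ l ∧ ∀ c ∈ l, 'a' ≤ c → c ≤ 'z' → m ≤ c := by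
  intro l
  induction l with
  | nil => intro m h; cases h
  | cons c r ih =>
    intro m h
    cases hlm : lowMin r with
    | none =>
      rw [lowMin_cons_none hlm] at h
      split at h
      case isTrue hc =>
        cases h
        refine ⟨hc, List.mem_cons_self .., ?_⟩
        intro d hd hd1 hd2
        rcases List.mem_cons.mp hd with rfl | hdr
        · exact le_refl _
        · exact absurd ⟨hd1, hd2⟩ (lowMin_none r hlm d hdr)
      case isFalse => cases h
    | some p =>
      obtain ⟨⟨hp1, hp2⟩, hpmem, hpmin⟩ := ih p hlm
      rw [lowMin_cons_some hlm] at h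
      by_cases hc : 'a' ≤ c ∧ c ≤ 'z'
      · rw [if_pos hc] at h
        by_cases hcp : c < p
        · rw [if_pos hcp] at h
          cases h
          refine ⟨hc, List.mem_cons_self .., ?_⟩
          intro d hd hd1 hd2
          rcases List.mem_cons.mp hd with rfl | hdr
          · exact le_refl _
          · exact le_of_lt (lt_of_lt_of_le hcp (hpmin d hdr hd1 hd2))
        · rw [if_neg hcp] at h
          cases h
          refine ⟨⟨hp1, hp2⟩, List.mem_cons_of_mem _ hpmem, ?_⟩
          intro d hd hd1 hd2
          rcases List.mem_cons.mp hd with rfl | hdr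
          · exact not_lt.mp hcp
          · exact hpmin d hdr hd1 hd2
      · rw [if_neg hc] at h
        cases h
        refine ⟨⟨hp1, hp2⟩, List.mem_cons_of_mem _ hpmem, ?_⟩
        intro d hd hd1 hd2
        rcases List.mem_cons.mp hd with rfl | hdr
        · exact absurd ⟨hd1, hd2⟩ hc
        · exact hpmin d hdr hd1 hd2

lemma find_lcLetters_eq_lowMin (l : List Char) :
    lcLetters.find? (fun c => decide (c ∈ l)) = lowMin l := by
  cases hlm : lowMin l with
  | none =>
    rw [List.find?_eq_none]
    intro c hcmem
    simp only [decide_eq_true_eq]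
    intro hcl
    exact lowMin_none l hlm c hcl (lcLetters_lower c hcmem)
  | some m =>
    obtain ⟨⟨h1, h2⟩, hmem, hmin⟩ := lowMin_some l m hlm
    have hml : m ∈ lcLetters := mem_lcLetters m h1 h2
    have hsome : (lcLetters.find? (fun c => decide (c ∈ l))).isSome := by
      rw [List.find?_isSome]
      exact ⟨m, hml, by simp [hmem]⟩
    obtain ⟨m', hm'⟩ := Option.isSome_iff_exists.mp hsome
    have pm' : m' ∈ l := by
      have := List.find?_some hm'
      simpa using this
    have hm'mem : m' ∈ lcLetters := List.mem_of_find?_eq_some hm'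
    obtain ⟨h1', h2'⟩ := lcLetters_lower m' hm'mem
    have hle1 : m ≤ m' := hmin m' pm' h1' h2'
    have hle2 : m' ≤ m := find?_sorted_min lcLetters_sorted hm' hml (by simp [hmem])
    rw [hm']
    exact congrArg some (le_antisymm hle2 hle1)

lemma minCharA_counts (freq : PySem.Dict Char Int) (l : List Char)
    (h : ∀ c : Char, 'a' ≤ c → c ≤ 'z' → freq.getD c 0 = (l.count c : Int)) :
    minCharA freq = (lowMin l).getD 'a' := by
  rw [minCharA_eq_find]
  have hpred : ∀ x ∈ lcLetters, (decide (0 < freq.getD x 0)) = (decide (x ∈ l)) := by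
    intro x hx
    obtain ⟨hx1, hx2⟩ := lcLetters_lower x hx
    rw [h x hx1 hx2]
    simp [Int.natCast_pos, List.count_pos_iff]
  rw [find?_congr_mem hpred, find_lcLetters_eq_lowMin]

lemma aPop_eq_bPop (freq : PySem.Dict Char Int) :
    ∀ st res, aPop freq st res = bPop (minCharA freq) st res := by
  intro st
  induction st with
  | nil => intro res; rfl
  | cons c t ih =>
    intro res
    simp only [aPop, bPop]
    split <;> simp [ih]

lemma aDrain_eq_bDrain : ∀ st res, aDrain st res = bDrain st res := by
  intro st
  induction st with
  | nil => intro res; rfl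
  | cons c t ih => intro res; simp [aDrain, bDrain, ih]

lemma aGo_eq_bGo : ∀ (rest : List Char) (freq : PySem.Dict Char Int) (st res : List Char),
    (∀ c : Char, 'a' ≤ c → c ≤ 'z' → freq.getD c 0 = (rest.count c : Int)) →
    aGo rest freq st res = bGo (rest.zip (sufLow rest).tail) st res := by
  intro rest
  induction rest with
  | nil => intro freq st res _; simpa [aGo, bGo] using aDrain_eq_bDrain st res
  | cons c r ih =>
    intro freq st res h
    rw [zip_sufLow_cons]
    simp only [aGo, bGo]
    have hcount : ∀ d : Char, 'a' ≤ d → d ≤ 'z' →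
        (freq.insert c (freq.getD c 0 - 1)).getD d 0 = (r.count d : Int) := by
      intro d h1 h2
      rw [PySem.Dict.getD_insert]
      by_cases hdc : d = c
      · subst hdc
        rw [if_pos rfl, h d h1 h2, List.count_cons_self]
        push_cast
        ring
      · rw [if_neg hdc, h d h1 h2]
        have hcd : (c == d) = false := by simp [Ne.symm hdc]
        have hdc' : (d == c) = false := by simp [hdc]
        simp [List.count_cons, hcd]
    have hmin : minCharA (freq.insert c (freq.getD c 0 - 1)) = (lowMin r).getD 'a' :=
      minCharA_counts _ r hcount
    rw [aPop_eq_bPop, hmin, ih _ _ _ hcount]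

-- ===== VERDICT (by name: the statement is the Claim_ definition above) =====
theorem robotWithString_spec : Claim_equal_robotWithString := by
  intro s _
  unfold Spec_robotWithString robotWithString robotWithString_alt
  congr 1
  exact aGo_eq_bGo s.toList _ [] [] (fun c _ _ => PySem.Dict.getD_counter s.toList c)
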